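-- pv_equiv track=rewrite | github.com/jonathonreilly/toy-physics | scripts/frontier_koide_delta_cl3_boundary_source_grammar_no_go.py | blade_mul
-- ===== SOURCE A (Python) =====
-- def right_multiply_vector(mask: int, index: int) -> tuple[int, int]:
--     """Return sign, mask for e_mask * e_index in Euclidean Cl(3)."""
--     greater = sum(1 for j in range(index + 1, 3) if mask & (1 << j))
--     sign = -1 if greater % 2 else 1
--     return sign, mask ^ (1 << index)
--
-- def blade_mul(left: int, right: int) -> tuple[int, int]:
--     sign = 1
--     out = left
--     for index in range(3):
--         if right & (1 << index):
--             s, out = right_multiply_vector(out, index)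
--             sign *= s
--     return sign, out
-- ===== SOURCE B (Python) =====
-- def blade_mul(left: int, right: int) -> tuple[int, int]:
--     la = left & 7
--     rb = right & 7
--     s = ((la >> 1) & rb).bit_count() + ((la >> 2) & rb).bit_count()
--     return (-1 if s % 2 else 1, left ^ rb)
-- ===== Notes on version B (the rewrite author's own statement) =====
-- stated objective: simpler
-- what changed: Replaces the per-basis-vector loop (three conditional calls to a helper that rescans the higher bits of the accumulated mask and multiplies signs) with a closed form: result mask = left ^ (right & 7), and the sign from the parity of the inversion count between the two low-3-bit masks computed by two shift-and-popcount steps.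
import Mathlib
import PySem

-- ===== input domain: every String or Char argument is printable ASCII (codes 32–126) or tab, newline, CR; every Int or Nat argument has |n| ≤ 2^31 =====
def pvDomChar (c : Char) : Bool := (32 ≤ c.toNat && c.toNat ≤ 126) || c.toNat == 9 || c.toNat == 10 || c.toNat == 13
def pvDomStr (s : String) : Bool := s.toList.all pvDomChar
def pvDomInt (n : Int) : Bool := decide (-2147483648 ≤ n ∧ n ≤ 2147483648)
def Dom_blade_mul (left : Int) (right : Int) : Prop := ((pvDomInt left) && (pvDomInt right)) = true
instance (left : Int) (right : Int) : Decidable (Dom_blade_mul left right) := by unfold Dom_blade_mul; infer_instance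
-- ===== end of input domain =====

-- B drops A's per-basis-vector loop and helper for a closed form (mask = left ^ (right & 7),
-- sign from the inversion-count parity of the two low-3-bit masks); same value, constant cost either way.

-- ===== PORT A =====
def right_multiply_vector (mask : Int) (index : Int) : Int × Int :=
  let greater := (PySem.List.pyRange (index + 1) 3 1).countP
      (fun j => PySem.Int.band mask ((1 : Int) <<< j.toNat) != 0)
  let sign : Int := if greater % 2 ≠ 0 then -1 else 1
  (sign, PySem.Int.bxor mask ((1 : Int) <<< index.toNat))

def blade_mul (left : Int) (right : Int) : Int × Int :=
  (PySem.List.pyRange 0 3 1).foldl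
    (fun st index =>
      if PySem.Int.band right ((1 : Int) <<< index.toNat) != 0 then
        let p := right_multiply_vector st.2 index
        (st.1 * p.1, p.2)
      else st)
    (1, left)

-- ===== PORT B =====
def blade_mul_alt (left : Int) (right : Int) : Int × Int :=
  let la := PySem.Int.band left 7
  let rb := PySem.Int.band right 7
  let s := PySem.Int.bitCount (PySem.Int.band (la >>> 1) rb)
         + PySem.Int.bitCount (PySem.Int.band (la >>> 2) rb)
  (if s % 2 ≠ 0 then -1 else 1, PySem.Int.bxor left rb)

-- ===== PRECONDITION & SPEC =====
def Spec_blade_mul (left : Int) (right : Int) (out : Int × Int) : Prop := out = blade_mul_alt left right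
instance (left : Int) (right : Int) (out : Int × Int) : Decidable (Spec_blade_mul left right out) := by unfold Spec_blade_mul; infer_instance

-- ===== CLAIM (what is proved, stated in full; the proofs are below) =====
def Claim_equal_blade_mul : Prop := ∀ (left : Int) (right : Int), Dom_blade_mul left right → Spec_blade_mul left right (blade_mul left right)

-- ===== LEMMAS AND PROOFS =====

-- Low-3-bit facts about Nat bitwise operations, used to split an Int into 8*q + r with 0 ≤ r < 8.
lemma natLandLow (k u m : Nat) (hu : u < 8) (hm : m < 8) : (8*k + u) &&& m = u &&& m := by
  apply Nat.eq_of_testBit_eq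
  intro i
  have h8 : (8:Nat)*k + u = 2^3*k + u := by ring_nf
  rw [Nat.testBit_land, Nat.testBit_land, h8, Nat.testBit_two_pow_mul_add k hu i]
  by_cases hi : i < 3
  · simp [hi]
  · have : m.testBit i = false := Nat.testBit_eq_false_of_lt (by
      calc m < 8 := hm
      _ = 2^3 := rfl
      _ ≤ 2^i := Nat.pow_le_pow_right (by norm_num) (by omega))
    simp [this]

lemma natXorLow (k u c : Nat) (hu : u < 8) (hc : c < 8) : (8*k + u) ^^^ c = 8*k + (u ^^^ c) := by
  apply Nat.eq_of_testBit_eq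
  intro i
  have h8 : ∀ x, (8:Nat)*k + x = 2^3*k + x := by intro x; ring_nf
  have hx : u ^^^ c < 8 := Nat.xor_lt_two_pow (n := 3) hu hc
  rw [Nat.testBit_xor, h8 u, h8 (u ^^^ c), Nat.testBit_two_pow_mul_add k hu i,
    Nat.testBit_two_pow_mul_add k hx i]
  by_cases hi : i < 3
  · simp [hi, Nat.testBit_xor]
  · have : c.testBit i = false := Nat.testBit_eq_false_of_lt (by
      calc c < 8 := hc
      _ = 2^3 := rfl
      _ ≤ 2^i := Nat.pow_le_pow_right (by norm_num) (by omega))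
    simp [hi, this]

lemma natSubLand (m u : Nat) (hm : m < 8) (hu : u < 8) : m - ((7 - u) &&& m) = u &&& m := by
  interval_cases m <;> interval_cases u <;> rfl

lemma natSevenSubXor (u c : Nat) (hu : u < 8) (hc : c < 8) : 7 - ((7 - u) ^^^ c) = u ^^^ c := by
  interval_cases u <;> interval_cases c <;> rfl

-- Python's  (8*q + r) & m  and  (8*q + r) ^ c  only look at r when 0 ≤ r, m, c < 8 (any sign of q).
lemma band_decomp (q r m : Int) (hr0 : 0 ≤ r) (hr : r < 8) (hm0 : 0 ≤ m) (hm : m < 8) :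
    PySem.Int.band (8*q + r) m = PySem.Int.band r m := by
  rcases (by omega : 0 ≤ q ∨ q < 0) with hq | hq
  · have h1 : 0 ≤ 8*q + r := by omega
    simp only [PySem.Int.band, if_pos h1, if_pos hm0, if_pos hr0]
    have h2 : (8*q + r).toNat = 8*q.toNat + r.toNat := by omega
    rw [h2, natLandLow _ _ _ (by omega) (by omega)]
  · have h1 : ¬ (0 ≤ 8*q + r) := by omega
    simp only [PySem.Int.band, if_neg h1, if_pos hm0, if_pos hr0]
    have hn : (-(8*q + r) - 1).toNat = 8*(-q-1).toNat + (7 - r.toNat) := by omega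
    rw [hn, Nat.land_comm, natLandLow _ _ _ (by omega) (by omega),
      natSubLand _ _ (by omega) (by omega)]

lemma bxor_decomp (q r c : Int) (hr0 : 0 ≤ r) (hr : r < 8) (hc0 : 0 ≤ c) (hc : c < 8) :
    PySem.Int.bxor (8*q + r) c = 8*q + PySem.Int.bxor r c := by
  rcases (by omega : 0 ≤ q ∨ q < 0) with hq | hq
  · have h1 : 0 ≤ 8*q + r := by omega
    simp only [PySem.Int.bxor, if_pos h1, if_pos hc0, if_pos hr0]
    have h2 : (8*q + r).toNat = 8*q.toNat + r.toNat := by omega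
    rw [h2, natXorLow _ _ _ (by omega) (by omega)]
    push_cast
    omega
  · have h1 : ¬ (0 ≤ 8*q + r) := by omega
    simp only [PySem.Int.bxor, if_neg h1, if_pos hc0, if_pos hr0]
    have hn : (-(8*q + r) - 1).toNat = 8*(-q-1).toNat + (7 - r.toNat) := by omega
    rw [hn, natXorLow _ _ _ (by omega) (by omega)]
    have h4 := natSevenSubXor r.toNat c.toNat (by omega) (by omega)
    have hx : (7 - r.toNat) ^^^ c.toNat < 8 := Nat.xor_lt_two_pow (n := 3) (by omega) (by omega)
    push_cast
    omega

lemma band_decomp0 (q m : Int) (hm0 : 0 ≤ m) (hm : m < 8) :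
    PySem.Int.band (8*q) m = 0 := by
  have h2 : PySem.Int.band 0 m = 0 := by rw [PySem.Int.band_comm]; simp
  have h := band_decomp q 0 m (by omega) (by omega) hm0 hm
  rw [h2] at h
  simpa using h

lemma bxor_decomp0 (q c : Int) (hc0 : 0 ≤ c) (hc : c < 8) :
    PySem.Int.bxor (8*q) c = 8*q + c := by
  have h := bxor_decomp q 0 c (by omega) (by omega) hc0 hc
  have h0 : PySem.Int.bxor 0 c = c := by rw [PySem.Int.bxor_comm]; simp
  simpa [h0] using h

set_option maxHeartbeats 4000000 in
theorem blade_mul_eq_alt (left right : Int) : blade_mul left right = blade_mul_alt left right := by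
  obtain ⟨ql, rl, hrl0, hrl8, hl⟩ : ∃ q r : Int, 0 ≤ r ∧ r < 8 ∧ left = 8*q + r :=
    ⟨left / 8, left % 8, by omega, by omega, by omega⟩
  obtain ⟨qr, rr, hrr0, hrr8, hr⟩ : ∃ q r : Int, 0 ≤ r ∧ r < 8 ∧ right = 8*q + r :=
    ⟨right / 8, right % 8, by omega, by omega, by omega⟩
  subst hl hr
  interval_cases rl <;> interval_cases rr <;>
    (simp [blade_mul, blade_mul_alt, right_multiply_vector, band_decomp, bxor_decomp,
      band_decomp0, bxor_decomp0,
      PySem.Int.band_of_nonneg, PySem.Int.bxor_of_nonneg,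
      List.foldl, List.countP, List.countP.go,
      (by decide : (1:Int) <<< (0:Int) = 1),
      (by decide : (1:Int) <<< (0:Nat) = 1),
      (by decide : (1:Int) <<< (1:Nat) = 2),
      (by decide : (1:Int) <<< (2:Nat) = 4),
      (by decide : (1:Int) <<< (1:Int) = 2),
      (by decide : (1:Int) <<< (2:Int) = 4),
      (by decide : PySem.List.pyRange 0 3 1 = [0,1,2]),
      (by decide : PySem.List.pyRange 1 3 1 = [1,2]),
      (by decide : PySem.List.pyRange 2 3 1 = [2]),
      (by decide : PySem.List.pyRange 3 3 1 = ([] : List Int))]) <;>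
    decide

-- ===== VERDICT (by name: the statement is the Claim_ definition above) =====
theorem blade_mul_spec : Claim_equal_blade_mul := by
  intro left right _
  unfold Spec_blade_mul
  exact blade_mul_eq_alt left right
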